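-- pv_equiv track=rewrite | github.com/ElizaDeani/k-means-app | backend/utils/clustering.py | suggest_cluster_name
-- ===== SOURCE A (Python) =====
-- def suggest_cluster_name(top_skills):
--     """
--     Menentukan nama cluster berdasarkan top skills
--     """
--     frontend_keywords = ['react', 'vue', 'angular', 'javascript', 'typescript', 'html', 'css', 'tailwind', 'bootstrap', 'next.js', 'redux']
--     backend_keywords = ['java', 'golang', 'python', 'node', 'php', 'laravel', 'spring', 'django', 'postgresql', 'mysql', 'mongodb']
--     devops_keywords = ['docker', 'kubernetes', 'aws', 'gcp', 'azure', 'ci/cd', 'jenkins', 'terraform']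
--
--     top_skills_lower = [s.lower() for s in top_skills[:5]]
--
--     frontend_count = sum(1 for skill in top_skills_lower if skill in frontend_keywords)
--     backend_count = sum(1 for skill in top_skills_lower if skill in backend_keywords)
--     devops_count = sum(1 for skill in top_skills_lower if skill in devops_keywords)
--
--     if frontend_count >= 2 and backend_count < 2:
--         return "Frontend Developer"
--     elif backend_count >= 2 and frontend_count < 2:
--         return "Backend Developer"
--     elif devops_count >= 2:
--         return "DevOps / Cloud Engineer"
--     elif frontend_count >= 2 and backend_count >= 2:
--         return "Fullstack Developer"
--     else:
--         return f"{top_skills[0].title()} Developer"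
-- ===== SOURCE B (Python) =====
-- _CATEGORIES = [
--     ("frontend", ['react', 'vue', 'angular', 'javascript', 'typescript', 'html', 'css', 'tailwind', 'bootstrap', 'next.js', 'redux']),
--     ("backend", ['java', 'golang', 'python', 'node', 'php', 'laravel', 'spring', 'django', 'postgresql', 'mysql', 'mongodb']),
--     ("devops", ['docker', 'kubernetes', 'aws', 'gcp', 'azure', 'ci/cd', 'jenkins', 'terraform']),
-- ]
-- _INDEX = {kw: cat for cat, kws in _CATEGORIES for kw in kws}
--
--
-- def suggest_cluster_name(top_skills):
--     counts = {"frontend": 0, "backend": 0, "devops": 0}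
--     for skill in top_skills[:5]:
--         cat = _INDEX.get(skill.lower())
--         if cat is not None:
--             counts[cat] += 1
--     f, b, d = counts["frontend"], counts["backend"], counts["devops"]
--     if f >= 2 and b < 2:
--         return "Frontend Developer"
--     elif b >= 2 and f < 2:
--         return "Backend Developer"
--     elif d >= 2:
--         return "DevOps / Cloud Engineer"
--     elif f >= 2 and b >= 2:
--         return "Fullstack Developer"
--     else:
--         return f"{top_skills[0].title()} Developer"
-- ===== Notes on version B (the rewrite author's own statement) =====
-- stated objective: alternative
-- what changed: Replaces the three separate membership scans over the lowered skill list with a single keyword-to-category index dict built once and one counting pass over the first five skills.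
import Mathlib
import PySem

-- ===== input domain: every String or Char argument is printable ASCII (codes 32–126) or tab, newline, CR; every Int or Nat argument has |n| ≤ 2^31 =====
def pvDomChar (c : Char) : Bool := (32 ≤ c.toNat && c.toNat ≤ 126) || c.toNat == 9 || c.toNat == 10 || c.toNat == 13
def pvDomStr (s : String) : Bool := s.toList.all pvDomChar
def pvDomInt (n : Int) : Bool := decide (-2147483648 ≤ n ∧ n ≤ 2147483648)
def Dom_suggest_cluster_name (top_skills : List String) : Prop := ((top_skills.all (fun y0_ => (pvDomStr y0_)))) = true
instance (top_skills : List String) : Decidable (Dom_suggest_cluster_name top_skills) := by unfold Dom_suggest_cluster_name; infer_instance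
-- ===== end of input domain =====

-- B replaces A's three membership scans by one keyword→category index dict and a single counting pass (objective: alternative).

-- hand port of str.title(), exact on the ASCII domain (cased = letter there):
-- a letter is uppercased after a non-letter, lowercased after a letter; other chars pass through
def pvTitleChars : List Char → Bool → List Char
  | [], _ => []
  | c :: rest, prev =>
    (if PySem.Chars.isalpha c then
        (if prev then PySem.Chars.lowerChar c else PySem.Chars.upperChar c)
      else c) :: pvTitleChars rest (PySem.Chars.isalpha c)

def pyTitle (s : String) : String := String.mk (pvTitleChars s.toList false)

-- ===== PORT A =====
def feKw : List String := ["react", "vue", "angular", "javascript", "typescript", "html", "css", "tailwind", "bootstrap", "next.js", "redux"]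
def beKw : List String := ["java", "golang", "python", "node", "php", "laravel", "spring", "django", "postgresql", "mysql", "mongodb"]
def deKw : List String := ["docker", "kubernetes", "aws", "gcp", "azure", "ci/cd", "jenkins", "terraform"]

def suggest_cluster_name (top_skills : List String) : String :=
  let lowerL := (PySem.List.slice top_skills none (some 5)).map PySem.Str.lower
  let fc : Int := lowerL.foldl (fun acc s => if feKw.contains s then acc + 1 else acc) 0
  let bc : Int := lowerL.foldl (fun acc s => if beKw.contains s then acc + 1 else acc) 0
  let dc : Int := lowerL.foldl (fun acc s => if deKw.contains s then acc + 1 else acc) 0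
  if fc ≥ 2 ∧ bc < 2 then "Frontend Developer"
  else if bc ≥ 2 ∧ fc < 2 then "Backend Developer"
  else if dc ≥ 2 then "DevOps / Cloud Engineer"
  else if fc ≥ 2 ∧ bc ≥ 2 then "Fullstack Developer"
  else match PySem.List.pyGet? top_skills 0 with
       | some s => pyTitle s ++ " Developer"
       | none => ""   -- IndexError in Python; excluded by Pre_

-- ===== PORT B =====
def kwCategories : List (String × List String) :=
  [("frontend", ["react", "vue", "angular", "javascript", "typescript", "html", "css", "tailwind", "bootstrap", "next.js", "redux"]),
   ("backend", ["java", "golang", "python", "node", "php", "laravel", "spring", "django", "postgresql", "mysql", "mongodb"]),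
   ("devops", ["docker", "kubernetes", "aws", "gcp", "azure", "ci/cd", "jenkins", "terraform"])]

def kwIndex : PySem.Dict String String :=
  PySem.Dict.ofList (kwCategories.flatMap (fun p => p.2.map (fun kw => (kw, p.1))))

def suggest_cluster_name_alt (top_skills : List String) : String :=
  let counts := (PySem.List.slice top_skills none (some 5)).foldl
      (fun (c : PySem.Dict String Int) skill =>
        match kwIndex.get? (PySem.Str.lower skill) with
        | some cat => c.modify cat 0 (· + 1)
        | none => c)
      (PySem.Dict.ofList [("frontend", 0), ("backend", 0), ("devops", 0)])
  let f := counts.getD "frontend" 0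
  let b := counts.getD "backend" 0
  let d := counts.getD "devops" 0
  if f ≥ 2 ∧ b < 2 then "Frontend Developer"
  else if b ≥ 2 ∧ f < 2 then "Backend Developer"
  else if d ≥ 2 then "DevOps / Cloud Engineer"
  else if f ≥ 2 ∧ b ≥ 2 then "Fullstack Developer"
  else match PySem.List.pyGet? top_skills 0 with
       | some s => pyTitle s ++ " Developer"
       | none => ""   -- IndexError in Python; excluded by Pre_

-- ===== PRECONDITION & SPEC =====
-- Pre_ excludes only the empty list, on which A (and B) raise IndexError at top_skills[0].
def Pre_suggest_cluster_name (top_skills : List String) : Prop := top_skills ≠ []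
instance (top_skills : List String) : Decidable (Pre_suggest_cluster_name top_skills) := by
  unfold Pre_suggest_cluster_name; infer_instance

def pvWitness_suggest_cluster_name : List String := ["python", "Django"]

def Spec_suggest_cluster_name (top_skills : List String) (out : String) : Prop := out = suggest_cluster_name_alt top_skills
instance (top_skills : List String) (out : String) : Decidable (Spec_suggest_cluster_name top_skills out) := by unfold Spec_suggest_cluster_name; infer_instance

-- ===== CLAIM (what is proved, stated in full; the proofs are below) =====
def Claim_equal_suggest_cluster_name : Prop := ∀ (top_skills : List String), Dom_suggest_cluster_name top_skills → Pre_suggest_cluster_name top_skills → Spec_suggest_cluster_name top_skills (suggest_cluster_name top_skills)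

-- ===== LEMMAS AND PROOFS =====

lemma get?_kwIndex (t : String) :
    kwIndex.get? t =
      if t ∈ feKw then some "frontend"
      else if t ∈ beKw then some "backend"
      else if t ∈ deKw then some "devops" else none := by
  by_cases hf : t ∈ feKw
  · fin_cases hf <;> decide
  · by_cases hb : t ∈ beKw
    · fin_cases hb <;> decide
    · by_cases hd : t ∈ deKw
      · fin_cases hd <;> decide
      · have hlit : kwIndex = PySem.Dict.mk [("react", "frontend"), ("vue", "frontend"), ("angular", "frontend"), ("javascript", "frontend"), ("typescript", "frontend"), ("html", "frontend"), ("css", "frontend"), ("tailwind", "frontend"), ("bootstrap", "frontend"), ("next.js", "frontend"), ("redux", "frontend"), ("java", "backend"), ("golang", "backend"), ("python", "backend"), ("node", "backend"), ("php", "backend"), ("laravel", "backend"), ("spring", "backend"), ("django", "backend"), ("postgresql", "backend"), ("mysql", "backend"), ("mongodb", "backend"), ("docker", "devops"), ("kubernetes", "devops"), ("aws", "devops"), ("gcp", "devops"), ("azure", "devops"), ("ci/cd", "devops"), ("jenkins", "devops"), ("terraform", "devops")] := by decide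
        simp only [feKw, beKw, deKw, List.mem_cons, List.not_mem_nil, or_false, not_or] at hf hb hd
        simp [hlit, PySem.Dict.get?_mk_cons, PySem.Dict.get?, beq_iff_eq, feKw, beKw, deKw, Ne.symm hf.1, hf.1, Ne.symm hf.2.1, hf.2.1, Ne.symm hf.2.2.1, hf.2.2.1, Ne.symm hf.2.2.2.1, hf.2.2.2.1, Ne.symm hf.2.2.2.2.1, hf.2.2.2.2.1, Ne.symm hf.2.2.2.2.2.1, hf.2.2.2.2.2.1, Ne.symm hf.2.2.2.2.2.2.1, hf.2.2.2.2.2.2.1, Ne.symm hf.2.2.2.2.2.2.2.1, hf.2.2.2.2.2.2.2.1, Ne.symm hf.2.2.2.2.2.2.2.2.1, hf.2.2.2.2.2.2.2.2.1, Ne.symm hf.2.2.2.2.2.2.2.2.2.1, hf.2.2.2.2.2.2.2.2.2.1, Ne.symm hf.2.2.2.2.2.2.2.2.2.2, hf.2.2.2.2.2.2.2.2.2.2, Ne.symm hb.1, hb.1, Ne.symm hb.2.1, hb.2.1, Ne.symm hb.2.2.1, hb.2.2.1, Ne.symm hb.2.2.2.1, hb.2.2.2.1, Ne.symm hb.2.2.2.2.1,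 hb.2.2.2.2.1, Ne.symm hb.2.2.2.2.2.1, hb.2.2.2.2.2.1, Ne.symm hb.2.2.2.2.2.2.1, hb.2.2.2.2.2.2.1, Ne.symm hb.2.2.2.2.2.2.2.1, hb.2.2.2.2.2.2.2.1, Ne.symm hb.2.2.2.2.2.2.2.2.1, hb.2.2.2.2.2.2.2.2.1, Ne.symm hb.2.2.2.2.2.2.2.2.2.1, hb.2.2.2.2.2.2.2.2.2.1, Ne.symm hb.2.2.2.2.2.2.2.2.2.2, hb.2.2.2.2.2.2.2.2.2.2, Ne.symm hd.1, hd.1, Ne.symm hd.2.1, hd.2.1, Ne.symm hd.2.2.1, hd.2.2.1, Ne.symm hd.2.2.2.1, hd.2.2.2.1, Ne.symm hd.2.2.2.2.1, hd.2.2.2.2.1, Ne.symm hd.2.2.2.2.2.1, hd.2.2.2.2.2.1, Ne.symm hd.2.2.2.2.2.2.1, hd.2.2.2.2.2.2.1, Ne.symm hd.2.2.2.2.2.2.2, hd.2.2.2.2.2.2.2]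

lemma foldl_count (kws : List String) (L : List String) (acc : Int) :
    L.foldl (fun a s => if kws.contains s then a + 1 else a) acc
      = acc + (L.countP (fun s => kws.contains s) : Int) := by
  induction L generalizing acc with
  | nil => simp
  | cons h tl ih =>
      simp only [List.foldl_cons, List.countP_cons, ih]
      by_cases hk : h ∈ kws <;> simp [hk] <;> ring

lemma bfold_counts (L : List String) (d : PySem.Dict String Int) :
    (L.foldl
      (fun (c : PySem.Dict String Int) skill =>
        match kwIndex.get? (PySem.Str.lower skill) with
        | some cat => c.modify cat 0 (· + 1)
        | none => c) d).getD "frontend" 0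
        = d.getD "frontend" 0 + (L.countP (fun s => decide (PySem.Str.lower s ∈ feKw)) : Int)
    ∧ (L.foldl
      (fun (c : PySem.Dict String Int) skill =>
        match kwIndex.get? (PySem.Str.lower skill) with
        | some cat => c.modify cat 0 (· + 1)
        | none => c) d).getD "backend" 0
        = d.getD "backend" 0 + (L.countP (fun s => !decide (PySem.Str.lower s ∈ feKw) && decide (PySem.Str.lower s ∈ beKw)) : Int)
    ∧ (L.foldl
      (fun (c : PySem.Dict String Int) skill =>
        match kwIndex.get? (PySem.Str.lower skill) with
        | some cat => c.modify cat 0 (· + 1)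
        | none => c) d).getD "devops" 0
        = d.getD "devops" 0 + (L.countP (fun s => !decide (PySem.Str.lower s ∈ feKw) && !decide (PySem.Str.lower s ∈ beKw) && decide (PySem.Str.lower s ∈ deKw)) : Int) := by
  induction L generalizing d with
  | nil => simp
  | cons s tl ih =>
    simp only [List.foldl_cons, List.countP_cons]
    have hkey := get?_kwIndex (PySem.Str.lower s)
    rcases hg : kwIndex.get? (PySem.Str.lower s) with _ | cat
    · rw [hg] at hkey
      split_ifs at hkey with hA hB hC
      obtain ⟨ihf, ihb, ihd⟩ := ih d
      refine ⟨?_, ?_, ?_⟩ <;> simp [hg, hA, hB, hC, ihf, ihb, ihd]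
    · rw [hg] at hkey
      split_ifs at hkey with hA hB hC
      · obtain rfl : cat = "frontend" := Option.some.inj hkey
        obtain ⟨ihf, ihb, ihd⟩ := ih (d.modify "frontend" 0 (· + 1))
        refine ⟨?_, ?_, ?_⟩ <;>
          simp [hg, hA, ihf, ihb, ihd, PySem.Dict.getD_modify_self, PySem.Dict.getD_modify_of_ne] <;>
          omega
      · obtain rfl : cat = "backend" := Option.some.inj hkey
        obtain ⟨ihf, ihb, ihd⟩ := ih (d.modify "backend" 0 (· + 1))
        refine ⟨?_, ?_, ?_⟩ <;>
          simp [hg, hA, hB, ihf, ihb, ihd, PySem.Dict.getD_modify_self, PySem.Dict.getD_modify_of_ne] <;>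
          omega
      · obtain rfl : cat = "devops" := Option.some.inj hkey
        obtain ⟨ihf, ihb, ihd⟩ := ih (d.modify "devops" 0 (· + 1))
        refine ⟨?_, ?_, ?_⟩ <;>
          simp [hg, hA, hB, hC, ihf, ihb, ihd, PySem.Dict.getD_modify_self, PySem.Dict.getD_modify_of_ne] <;>
          omega

lemma mem_disj_be (t : String) :
    (!decide (t ∈ feKw) && decide (t ∈ beKw)) = decide (t ∈ beKw) := by
  by_cases h : t ∈ feKw
  · fin_cases h <;> decide
  · simp [h]

lemma mem_disj_de (t : String) :
    (!decide (t ∈ feKw) && !decide (t ∈ beKw) && decide (t ∈ deKw)) = decide (t ∈ deKw) := by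
  by_cases h : t ∈ feKw
  · fin_cases h <;> decide
  · by_cases h' : t ∈ beKw
    · fin_cases h' <;> decide
    · simp [h, h']

-- ===== VERDICT (by name: the statement is the Claim_ definition above) =====
theorem suggest_cluster_name_spec : Claim_equal_suggest_cluster_name := by
  intro ts _ _
  unfold Spec_suggest_cluster_name
  simp only [suggest_cluster_name, suggest_cluster_name_alt]
  obtain ⟨hf, hb, hd⟩ := bfold_counts (PySem.List.slice ts none (some 5))
      (PySem.Dict.ofList [("frontend", 0), ("backend", 0), ("devops", 0)])
  simp only [mem_disj_be, mem_disj_de] at hb hd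
  rw [hf, hb, hd, foldl_count, foldl_count, foldl_count]
  have e1 : (PySem.Dict.ofList [("frontend", (0:Int)), ("backend", 0), ("devops", 0)]).getD "frontend" 0 = 0 := by decide
  have e2 : (PySem.Dict.ofList [("frontend", (0:Int)), ("backend", 0), ("devops", 0)]).getD "backend" 0 = 0 := by decide
  have e3 : (PySem.Dict.ofList [("frontend", (0:Int)), ("backend", 0), ("devops", 0)]).getD "devops" 0 = 0 := by decide
  simp [List.countP_map, List.contains_eq_mem, Function.comp_def, e1, e2, e3]
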